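-- pv_equiv track=rewrite | github.com/machamp-nlp/machamp | machamp/utils/tok_utils.py | get_space_locations
-- ===== SOURCE A (Python) =====
-- def get_space_locations(text: str):
--     """
--     Find the indices of whitespaces. Note that the whitespaces
--     themselves are not counted in the indices.
--
--     Parameters
--     ----------
--     text: str
--         Input text with whitespaces
--
--     Returns
--     -------
--     space_locations: List[int]
--         Location of whitespaces in text
--     """
--     space_locs = []
--     cur_char_idx = 0
--     for char in text:
--         if char == ' ':
--             space_locs.append(cur_char_idx)
--         else:
--             cur_char_idx += 1
--     space_locs.append(cur_char_idx)
--     return space_locs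
-- ===== SOURCE B (Python) =====
-- def get_space_locations(text: str):
--     """Prefix sums of segment lengths of text.split(' ') — one entry per segment."""
--     locs = []
--     total = 0
--     for part in text.split(' '):
--         total += len(part)
--         locs.append(total)
--     return locs
-- ===== Notes on version B (the rewrite author's own statement) =====
-- stated objective: idiomatic
-- what changed: Replaces the per-character counter loop with a single-space str.split and a running prefix sum of segment lengths (one entry per segment).
import Mathlib
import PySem

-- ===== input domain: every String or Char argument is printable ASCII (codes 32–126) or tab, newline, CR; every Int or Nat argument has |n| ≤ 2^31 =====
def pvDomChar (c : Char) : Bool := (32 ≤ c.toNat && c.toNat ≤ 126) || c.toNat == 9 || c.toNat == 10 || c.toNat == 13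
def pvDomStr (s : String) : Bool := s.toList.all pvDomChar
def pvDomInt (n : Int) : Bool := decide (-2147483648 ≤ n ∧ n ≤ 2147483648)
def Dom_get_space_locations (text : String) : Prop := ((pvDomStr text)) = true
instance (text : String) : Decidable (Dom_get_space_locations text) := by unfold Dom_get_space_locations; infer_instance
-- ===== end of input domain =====

-- B replaces A's per-character space-counting loop with prefix sums of the lengths of text.split(' ') segments (idiomatic, same O(n) cost).
-- ===== PORT A =====
def get_space_locations (text : String) : List Int :=
  let st := text.toList.foldl
    (fun (st : List Int × Int) c =>
      if c = ' ' then (st.1 ++ [st.2], st.2) else (st.1, st.2 + 1))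
    ([], 0)
  st.1 ++ [st.2]

-- ===== PORT B =====
def get_space_locations_alt (text : String) : List Int :=
  let parts := PySem.Chars.splitOn text.toList [' ']
  (parts.foldl
    (fun (st : Int × List Int) p =>
      (st.1 + (p.length : Int), st.2 ++ [st.1 + (p.length : Int)]))
    (0, [])).2

-- ===== PRECONDITION & SPEC =====
def Spec_get_space_locations (text : String) (out : List Int) : Prop := out = get_space_locations_alt text
instance (text : String) (out : List Int) : Decidable (Spec_get_space_locations text out) := by unfold Spec_get_space_locations; infer_instance

-- ===== CLAIM (what is proved, stated in full; the proofs are below) =====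
def Claim_equal_get_space_locations : Prop := ∀ (text : String), Dom_get_space_locations text → Spec_get_space_locations text (get_space_locations text)

-- ===== LEMMAS AND PROOFS =====

-- the segments of cs split on the single space character
def pvParts : List Char → List (List Char)
  | [] => [[]]
  | c :: rest =>
    if c = ' ' then [] :: pvParts rest
    else match pvParts rest with
      | p :: ps => (c :: p) :: ps
      | [] => [[c]]

-- the common characterisation: prefix sums of non-space counts, one entry per segment
def pvG : List Char → Int → List Int
  | [], n => [n]
  | c :: rest, n => if c = ' ' then n :: pvG rest n else pvG rest (n + 1)

theorem pvParts_ne_nil (cs : List Char) : pvParts cs ≠ [] := by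
  cases cs with
  | nil => simp [pvParts]
  | cons c rest =>
    simp only [pvParts]
    split
    · simp
    · cases h : pvParts rest <;> simp

def pvPrep (cur : List Char) : List (List Char) → List (List Char)
  | [] => []
  | p :: ps => (cur.reverse ++ p) :: ps

theorem pvA_fold (cs : List Char) : ∀ (locs : List Int) (n : Int),
    (List.foldl
      (fun (st : List Int × Int) c =>
        if c = ' ' then (st.1 ++ [st.2], st.2) else (st.1, st.2 + 1))
      (locs, n) cs).1 ++
    [(List.foldl
      (fun (st : List Int × Int) c =>
        if c = ' ' then (st.1 ++ [st.2], st.2) else (st.1, st.2 + 1))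
      (locs, n) cs).2] = locs ++ pvG cs n := by
  induction cs with
  | nil => intro locs n; simp [pvG]
  | cons c rest ih =>
    intro locs n
    by_cases hc : c = ' ' <;> simp [hc, pvG, List.foldl, ih]

theorem pv_splitOn_go (cs : List Char) : ∀ (fuel : Nat), cs.length ≤ fuel →
    ∀ (cur : List Char) (acc : List (List Char)),
    PySem.Chars.splitOn.go [' '] (fuel + 1) cs cur acc =
      acc.reverse ++ pvPrep cur (pvParts cs) := by
  induction cs with
  | nil =>
    intro fuel _ cur acc
    cases fuel <;> simp [PySem.Chars.splitOn.go, pvParts, pvPrep]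
  | cons c rest ih =>
    intro fuel hf cur acc
    cases fuel with
    | zero => simp at hf
    | succ f =>
      have hr : rest.length ≤ f := by simpa using hf
      by_cases hc : c = ' '
      · subst hc
        simp only [PySem.Chars.splitOn.go, List.isPrefixOf, beq_self_eq_true,
          Bool.true_and, if_true, List.length_cons,
          List.drop_succ_cons, List.length_nil, List.drop_zero]
        rw [ih f hr [] (cur.reverse :: acc)]
        rcases h : pvParts rest with _ | ⟨p, ps⟩
        · exact absurd h (pvParts_ne_nil rest)
        · simp [pvPrep, pvParts, h]
      · have hpre : List.isPrefixOf [' '] (c :: rest) = false := by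
          simp [List.isPrefixOf]
          intro h; exact hc h.symm
        simp only [PySem.Chars.splitOn.go, hpre, Bool.false_eq_true, if_false]
        rw [ih f hr (c :: cur) acc]
        rcases h : pvParts rest with _ | ⟨p, ps⟩
        · exact absurd h (pvParts_ne_nil rest)
        · simp [pvPrep, pvParts, hc, h]

theorem pv_splitOn (cs : List Char) :
    PySem.Chars.splitOn cs [' '] = pvParts cs := by
  unfold PySem.Chars.splitOn
  rw [pv_splitOn_go cs cs.length (le_refl _) [] []]
  rcases h : pvParts cs with _ | ⟨p, ps⟩
  · exact absurd h (pvParts_ne_nil cs)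
  · simp [pvPrep]

theorem pvB_fold (cs : List Char) : ∀ (t : Int) (out : List Int),
    (List.foldl
      (fun (st : Int × List Int) p =>
        (st.1 + (p.length : Int), st.2 ++ [st.1 + (p.length : Int)]))
      (t, out) (pvParts cs)).2 = out ++ pvG cs t := by
  induction cs with
  | nil => intro t out; simp [pvParts, pvG]
  | cons c rest ih =>
    intro t out
    by_cases hc : c = ' '
    · simp only [pvParts, hc, if_true, List.foldl, pvG]
      simpa using ih t (out ++ [t])
    · rcases h : pvParts rest with _ | ⟨p, ps⟩
      · exact absurd h (pvParts_ne_nil rest)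
      · simp only [pvParts, hc, if_false, h, List.foldl]
        have step : (t + ((c :: p).length : Int), out ++ [t + ((c :: p).length : Int)])
            = ((t + 1) + (p.length : Int), out ++ [(t + 1) + (p.length : Int)]) := by
          simp
          omega
        rw [step]
        have := ih (t + 1) out
        rw [h] at this
        simp only [List.foldl] at this
        rw [this]
        simp [pvG, hc]

-- ===== VERDICT (by name: the statement is the Claim_ definition above) =====
theorem get_space_locations_spec : Claim_equal_get_space_locations := by
  intro text _
  unfold Spec_get_space_locations get_space_locations get_space_locations_alt
  rw [pv_splitOn, pvB_fold]
  simpa using pvA_fold text.toList [] 0
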